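-- pv_equiv track=rewrite | github.com/Awosborn/GEKO-Project-301 | MVP/GEKO_PLAYABLE_MODEL/playable_bridge_ai.py | calibration_bucket
-- ===== SOURCE A (Python) =====
-- from typing import Dict, List, Mapping, Sequence, Tuple
--
-- TRUMP_ORDER = {"C": 0, "D": 1, "H": 2, "S": 3, "NT": 4}
--
-- def normalize_bid(raw: object) -> str:
--     token = str(raw).strip() if raw is not None else ""
--     if not token:
--         return "UNK"
--     lower = token.lower()
--     if lower in {"pass", "p"}:
--         return "P"
--     if lower in {"d", "x"}:
--         return "X"
--     if lower in {"r", "xx"}: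
--         return "XX"
--     token = token.upper()
--     if len(token) == 2 and token[0] in "1234567" and token[1] == "N":
--         return f"{token[0]}NT"
--     return token
--
-- def is_contract_bid(token: str) -> bool:
--     bid = normalize_bid(token)
--     return len(bid) >= 2 and bid[0] in "1234567" and bid[1:] in TRUMP_ORDER
--
-- def calibration_bucket(bid_prefix: Sequence[str]) -> str:
--     bids = [normalize_bid(bid) for bid in bid_prefix]
--     if not bids or all(bid == "P" for bid in bids):
--         return "unopened"
--     last_contract_index = -1
--     last_contract_level = 0
--     for index, bid in enumerate(bids):
--         if is_contract_bid(bid):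
--             last_contract_index = index
--             last_contract_level = int(bid[0])
--     if last_contract_level >= 3:
--         return "high_contract"
--     if last_contract_index >= 0 and any(bid in {"X", "XX"} for bid in bids[last_contract_index + 1 :]):
--         return "doubled"
--     if len(bids) >= 6:
--         return "late_auction"
--     return "competitive"
-- ===== SOURCE B (Python) =====
-- TRUMP_ORDER = {"C": 0, "D": 1, "H": 2, "S": 3, "NT": 4}
--
-- def normalize_bid(raw):
--     token = str(raw).strip() if raw is not None else ""
--     if not token:
--         return "UNK"
--     lower = token.lower()
--     if lower in {"pass", "p"}:
--         return "P"
--     if lower in {"d", "x"}: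
--         return "X"
--     if lower in {"r", "xx"}:
--         return "XX"
--     token = token.upper()
--     if len(token) == 2 and token[0] in "1234567" and token[1] == "N":
--         return f"{token[0]}NT"
--     return token
--
-- def is_contract_bid(token):
--     bid = normalize_bid(token)
--     return len(bid) >= 2 and bid[0] in "1234567" and bid[1:] in TRUMP_ORDER
--
-- def calibration_bucket(bid_prefix):
--     bids = [normalize_bid(bid) for bid in bid_prefix]
--     if not bids or all(bid == "P" for bid in bids):
--         return "unopened"
--     # single reverse pass with early exit: find the LAST contract bid and
--     # whether any X/XX occurs after it
--     found = False
--     level = 0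
--     doubled_after = False
--     for bid in reversed(bids):
--         if is_contract_bid(bid):
--             found = True
--             level = int(bid[0])
--             break
--         if bid in ("X", "XX"):
--             doubled_after = True
--     if level >= 3:
--         return "high_contract"
--     if found and doubled_after:
--         return "doubled"
--     if len(bids) >= 6:
--         return "late_auction"
--     return "competitive"
-- ===== Notes on version B (the rewrite author's own statement) =====
-- stated objective: alternative
-- what changed: Replaces A's forward enumerate-scan for the last contract bid plus a second scan over the tail slice for X/XX with a single reverse early-exit loop that finds the last contract bid and the doubled-after flag in one pass.
import Mathlib
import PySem

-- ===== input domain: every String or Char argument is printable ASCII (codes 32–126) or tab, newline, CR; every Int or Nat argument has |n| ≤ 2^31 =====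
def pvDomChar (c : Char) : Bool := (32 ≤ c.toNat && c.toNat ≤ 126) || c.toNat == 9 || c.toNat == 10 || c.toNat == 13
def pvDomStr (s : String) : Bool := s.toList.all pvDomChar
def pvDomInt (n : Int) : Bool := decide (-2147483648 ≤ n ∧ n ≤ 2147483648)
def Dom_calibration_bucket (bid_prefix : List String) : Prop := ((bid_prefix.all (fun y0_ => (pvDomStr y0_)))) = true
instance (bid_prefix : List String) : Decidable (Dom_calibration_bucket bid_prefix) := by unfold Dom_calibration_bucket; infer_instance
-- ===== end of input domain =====

-- B replaces A's forward last-contract scan + tail-slice rescan by one reverse early-exit pass (alternative decomposition, same cost).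
-- ===== PORT A =====
-- shared module helpers (both the Python A and the Python B contain these verbatim)
def TRUMP_ORDER : PySem.Dict String Int :=
  ((((PySem.Dict.empty.insert "C" 0).insert "D" 1).insert "H" 2).insert "S" 3).insert "NT" 4

def normalize_bid (raw : String) : String :=
  -- raw is always a str at the call sites ported here, so 'str(raw)… if raw is not None' is just strip(raw)
  let token := PySem.Str.strip raw
  if token = "" then "UNK"
  else
    let lower := PySem.Str.lower token
    if lower = "pass" || lower = "p" then "P"
    else if lower = "d" || lower = "x" then "X"
    else if lower = "r" || lower = "xx" then "XX"
    else
      let token := PySem.Str.upper token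
      match token.toList with
      | [c0, c1] =>  -- len(token) == 2
        if ("1234567".toList.contains c0) && (c1 = 'N')
        then String.ofList [c0, 'N', 'T']  -- f"{token[0]}NT"
        else token
      | _ => token

def is_contract_bid (token : String) : Bool :=
  let bid := (normalize_bid token).toList
  decide (2 ≤ bid.length) &&
    (match bid with | c :: _ => "1234567".toList.contains c | [] => false) &&  -- bid[0] in "1234567" (guarded by len ≥ 2)
    TRUMP_ORDER.contains (String.ofList (bid.drop 1))  -- bid[1:] in TRUMP_ORDER

-- int(bid[0]); the none branches (IndexError/ValueError) are unreachable at both call sites,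
-- where is_contract_bid bid = true and bid is a normalize_bid output (first char is the digit)
def bid_level (bid : String) : Int :=
  match PySem.List.pyGet? bid.toList 0 with
  | some c => (PySem.Int.ofStr? (String.ofList [c])).getD 0
  | none => 0

def calibration_bucket (bid_prefix : List String) : String :=
  let bids := bid_prefix.map normalize_bid
  if bids.isEmpty || bids.all (fun b => b == "P") then "unopened"
  else
    let st := (PySem.List.enumerate bids 0).foldl
      (fun (st : Int × Int) p => if is_contract_bid p.2 then (p.1, bid_level p.2) else st)
      (-1, 0)
    if 3 ≤ st.2 then "high_contract"
    else if decide (0 ≤ st.1) &&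
        (PySem.List.slice bids (some (st.1 + 1)) none).any (fun b => b == "X" || b == "XX") then "doubled"
    else if 6 ≤ bids.length then "late_auction"
    else "competitive"

-- ===== PORT B =====
-- the reverse early-exit loop of Source B: state (found, level, doubled_after)
def cbLoop (doubled : Bool) : List String → Bool × Int × Bool
  | [] => (false, 0, doubled)
  | bid :: rest =>
    if is_contract_bid bid then (true, bid_level bid, doubled)
    else cbLoop (doubled || (bid == "X" || bid == "XX")) rest

def calibration_bucket_alt (bid_prefix : List String) : String :=
  let bids := bid_prefix.map normalize_bid
  if bids.isEmpty || bids.all (fun b => b == "P") then "unopened"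
  else
    let r := cbLoop false bids.reverse
    if 3 ≤ r.2.1 then "high_contract"
    else if r.1 && r.2.2 then "doubled"
    else if 6 ≤ bids.length then "late_auction"
    else "competitive"

-- ===== PRECONDITION & SPEC =====
def Spec_calibration_bucket (bid_prefix : List String) (out : String) : Prop := out = calibration_bucket_alt bid_prefix
instance (bid_prefix : List String) (out : String) : Decidable (Spec_calibration_bucket bid_prefix out) := by unfold Spec_calibration_bucket; infer_instance

-- ===== CLAIM (what is proved, stated in full; the proofs are below) =====
def Claim_equal_calibration_bucket : Prop := ∀ (bid_prefix : List String), Dom_calibration_bucket bid_prefix → Spec_calibration_bucket bid_prefix (calibration_bucket bid_prefix)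

-- ===== LEMMAS AND PROOFS =====

-- A's forward scan, abstracted
def aScan (bs : List String) : Int × Int :=
  (PySem.List.enumerate bs 0).foldl
    (fun (st : Int × Int) p => if is_contract_bid p.2 then (p.1, bid_level p.2) else st)
    (-1, 0)

theorem aScan_eq (bid_prefix : List String) :
    (PySem.List.enumerate (bid_prefix.map normalize_bid) 0).foldl
      (fun (st : Int × Int) p => if is_contract_bid p.2 then (p.1, bid_level p.2) else st)
      (-1, 0) = aScan (bid_prefix.map normalize_bid) := rfl

theorem aScan_snoc (l : List String) (x : String) :
    aScan (l ++ [x]) = if is_contract_bid x then ((l.length : Int), bid_level x) else aScan l := by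
  unfold aScan
  rw [PySem.List.enumerate_append, List.foldl_append]
  simp [PySem.List.enumerate]

theorem aScan_idx_bound (l : List String) :
    (aScan l).1 = -1 ∨ (0 ≤ (aScan l).1 ∧ (aScan l).1 < l.length) := by
  induction l using List.reverseRecOn with
  | nil => left; rfl
  | append_singleton l x ih =>
    rw [aScan_snoc]
    cases h : is_contract_bid x
    · simp only [Bool.false_eq_true, ite_false]
      rcases ih with h1 | ⟨h1, h2⟩
      · left; exact h1
      · right
        refine ⟨h1, ?_⟩
        simp only [List.length_append, List.length_cons, List.length_nil]
        push_cast
        omega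
    · simp only [ite_true]
      right
      refine ⟨by positivity, ?_⟩
      simp only [List.length_append, List.length_cons, List.length_nil]
      push_cast
      omega

theorem cbLoop_doubled (d : Bool) (bs : List String) :
    cbLoop d bs = ((cbLoop false bs).1, (cbLoop false bs).2.1, d || (cbLoop false bs).2.2) := by
  induction bs generalizing d with
  | nil => simp [cbLoop]
  | cons b rest ih =>
    cases h : is_contract_bid b
    · simp only [cbLoop, h, Bool.false_eq_true, ite_false, Bool.false_or]
      rw [ih, ih (b == "X" || b == "XX")]
      simp [Bool.or_comm, Bool.or_left_comm]
    · simp [cbLoop, h]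

-- main invariant: the reverse pass computes A's (index-found flag, level, doubled-after) data
theorem main_inv (l : List String) :
    (cbLoop false l.reverse).1 = decide (0 ≤ (aScan l).1) ∧
    (cbLoop false l.reverse).2.1 = (aScan l).2 ∧
    ((cbLoop false l.reverse).1 && (cbLoop false l.reverse).2.2)
      = (decide (0 ≤ (aScan l).1) &&
         (PySem.List.slice l (some ((aScan l).1 + 1)) none).any (fun b => b == "X" || b == "XX")) := by
  induction l using List.reverseRecOn with
  | nil => refine ⟨rfl, rfl, ?_⟩; simp [cbLoop, aScan, PySem.List.enumerate]
  | append_singleton l x ih =>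
    rw [aScan_snoc, List.reverse_append, List.reverse_singleton, List.singleton_append]
    cases h : is_contract_bid x
    · -- x is not a contract bid
      simp only [Bool.false_eq_true, ite_false]
      simp only [cbLoop, h, Bool.false_eq_true, ite_false, Bool.false_or]
      rw [cbLoop_doubled]
      obtain ⟨ih1, ih2, ih3⟩ := ih
      refine ⟨ih1, ih2, ?_⟩
      cases hf : (cbLoop false l.reverse).1
      · rw [hf] at ih1
        simp [← ih1]
      · -- a contract bid exists in l: 0 ≤ i < l.length
        have hi : 0 ≤ (aScan l).1 := of_decide_eq_true (hf ▸ ih1).symm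
        have hilt : (aScan l).1 < l.length := by
          rcases aScan_idx_bound l with h1 | ⟨_, h2⟩
          · omega
          · exact h2
        have hslice : PySem.List.slice (l ++ [x]) (some ((aScan l).1 + 1)) none
            = PySem.List.slice l (some ((aScan l).1 + 1)) none ++ [x] := by
          rw [PySem.List.slice_from (l ++ [x]) (a := (aScan l).1 + 1) (by omega),
              PySem.List.slice_from l (a := (aScan l).1 + 1) (by omega),
              List.drop_append_of_le_length (by omega)]
        rw [hslice]
        rw [hf] at ih3
        have hd : decide (0 ≤ (aScan l).1) = true := decide_eq_true hi
        rw [hd] at ih3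
        simp only [Bool.true_and] at ih3
        simp only [hd, Bool.true_and, List.any_append, List.any_cons, List.any_nil,
          Bool.or_false, ih3]
        simp [Bool.or_comm]
    · -- x is the last contract bid
      simp only [ite_true]
      simp only [cbLoop, h, ite_true]
      refine ⟨by simp, trivial, ?_⟩
      have hnil : PySem.List.slice (l ++ [x]) (some ((l.length : Int) + 1)) = [] := by
        rw [PySem.List.slice_from (l ++ [x]) (a := (l.length : Int) + 1) (by positivity)]
        apply List.drop_eq_nil_of_le
        simp only [List.length_append, List.length_cons, List.length_nil]
        omega
      rw [hnil]
      simp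

-- ===== VERDICT (by name: the statement is the Claim_ definition above) =====
theorem calibration_bucket_spec : Claim_equal_calibration_bucket := by
  intro bid_prefix _
  unfold Spec_calibration_bucket calibration_bucket calibration_bucket_alt
  simp only [aScan_eq]
  set bids := bid_prefix.map normalize_bid with hbids
  by_cases hg : (bids.isEmpty || bids.all (fun b => b == "P")) = true
  · simp [hg]
  · simp only [Bool.not_eq_true] at hg
    simp only [hg, Bool.false_eq_true, ite_false]
    obtain ⟨h1, h2, h3⟩ := main_inv bids
    have h4 := h3
    rw [h1] at h4
    rw [h1, h2, h4]
    rfl
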